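-- pv_equiv track=rewrite | github.com/nsg-ethz/mini_internet_project | platform/utils/autograder/bgp/make_db.py | split_at_ws
-- ===== SOURCE A (Python) =====
-- def split_at_ws(line):
--     n = ""
--     ws = False
--     for ch in line:
--         if ch.isspace():
--             if ws:
--                 continue
--             else:
--                 ws = True
--                 ch = " "
--         else:
--             ws = False
--         n += ch
--     return n.split(" ")
-- ===== SOURCE B (Python) =====
-- def split_at_ws(line):
--     # Run-based scan: walk maximal whitespace / non-whitespace runs and build
--     # the token list directly, without the intermediate collapsed string.
--     result = [""]
--     i = 0
--     n = len(line)
--     while i < n: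
--         j = i
--         if line[i].isspace():
--             while j < n and line[j].isspace():
--                 j += 1
--             result.append("")
--         else:
--             while j < n and not line[j].isspace():
--                 j += 1
--             result[-1] = line[i:j]
--         i = j
--     return result
-- ===== Notes on version B (the rewrite author's own statement) =====
-- stated objective: alternative
-- what changed: B scans the line run-by-run with two indices and builds the token list directly, instead of A's char-by-char fold that first builds a whitespace-collapsed copy of the string and then splits it on spaces.
import Mathlib
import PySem

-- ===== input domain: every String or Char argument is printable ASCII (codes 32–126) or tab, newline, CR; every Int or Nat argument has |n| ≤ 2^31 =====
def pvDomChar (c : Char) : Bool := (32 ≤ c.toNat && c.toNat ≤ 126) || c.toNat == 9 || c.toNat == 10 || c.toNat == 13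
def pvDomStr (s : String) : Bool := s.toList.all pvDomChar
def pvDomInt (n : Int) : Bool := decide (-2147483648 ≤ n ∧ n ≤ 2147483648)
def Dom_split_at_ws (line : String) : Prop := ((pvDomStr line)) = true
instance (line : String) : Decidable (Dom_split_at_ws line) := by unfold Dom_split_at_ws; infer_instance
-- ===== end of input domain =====

-- B replaces A's collapse-then-split (char-by-char fold building an intermediate
-- string, then str.split(" ")) by a run-by-run scan that builds the token list
-- directly; same return value on every input (alternative decomposition).


-- ===== PORT A =====
-- the 'for ch in line:' loop over state (n, ws); then n.split(" ")
def aLoop : List Char → List Char → Bool → List Char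
  | [], n, _ => n
  | c :: rest, n, ws =>
    if PySem.Chars.isspace c then
      if ws then aLoop rest n ws
      else aLoop rest (n ++ [' ']) true
    else aLoop rest (n ++ [c]) false

def split_at_ws (line : String) : List String :=
  (PySem.Chars.splitOn (aLoop line.toList [] false) [' ']).map String.ofList

-- ===== PORT B =====
-- Source B's while loop: each iteration consumes the maximal run starting at i
-- (the inner 'while j < n and …: j += 1' loops are the takeWhile/dropWhile of
-- the rest after the already-tested head char); 'result.append("")' /
-- 'result[-1] = line[i:j]' act on the accumulator res
def altLoop (l : List Char) (res : List String) : List String :=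
  match l with
  | [] => res
  | c :: rest =>
    if PySem.Chars.isspace c then
      altLoop (rest.dropWhile PySem.Chars.isspace) (res ++ [""])
    else
      altLoop (rest.dropWhile (fun x => !PySem.Chars.isspace x))
        (res.dropLast ++ [String.ofList (c :: rest.takeWhile (fun x => !PySem.Chars.isspace x))])
termination_by l.length
decreasing_by
  all_goals exact Nat.lt_succ_of_le (List.length_dropWhile_le _ _)

def split_at_ws_alt (line : String) : List String := altLoop line.toList [""]

-- ===== PRECONDITION & SPEC =====
def Spec_split_at_ws (line : String) (out : List String) : Prop := out = split_at_ws_alt line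
instance (line : String) (out : List String) : Decidable (Spec_split_at_ws line out) := by unfold Spec_split_at_ws; infer_instance

-- ===== CLAIM (what is proved, stated in full; the proofs are below) =====
def Claim_equal_split_at_ws : Prop := ∀ (line : String), Dom_split_at_ws line → Spec_split_at_ws line (split_at_ws line)

-- ===== LEMMAS AND PROOFS =====

-- split-on-single-space as a plain structural recursion (proof-side model of splitOn · [' '])
def consume : List Char → List Char → List (List Char)
  | [], cur => [cur.reverse]
  | c :: rest, cur => if c = ' ' then cur.reverse :: consume rest [] else consume rest (c :: cur)

theorem go_eq_consume (fuel : Nat) (l cur : List Char) (acc : List (List Char))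
    (h : l.length ≤ fuel) :
    PySem.Chars.splitOn.go [' '] fuel l cur acc = acc.reverse ++ consume l cur := by
  induction fuel generalizing l cur acc with
  | zero =>
    have : l = [] := by cases l <;> simp_all
    subst this
    simp [PySem.Chars.splitOn.go, consume]
  | succ fuel ih =>
    cases l with
    | nil => simp [PySem.Chars.splitOn.go, consume]
    | cons c rest =>
      rw [PySem.Chars.splitOn.go]
      by_cases hc : c = ' '
      · subst hc
        simp only [List.isPrefixOf, beq_self_eq_true, Bool.true_and, if_pos]
        rw [ih _ _ _ (by simpa using Nat.le_of_succ_le_succ h)]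
        simp [consume]
      · have hpre : [' '].isPrefixOf (c :: rest) = false := by
          simp [List.isPrefixOf]; exact fun h' => (hc h'.symm).elim
        rw [hpre]
        simp only [Bool.false_eq_true, if_false]
        rw [ih _ _ _ (by simpa using Nat.le_of_succ_le_succ h)]
        simp [consume, hc]

theorem splitOn_eq_consume (l : List Char) :
    PySem.Chars.splitOn l [' '] = consume l [] := by
  unfold PySem.Chars.splitOn
  simpa using go_eq_consume (l.length + 1) l [] [] (by omega)

theorem consume_no_space (w : List Char) (cur : List Char) (hw : ∀ c ∈ w, c ≠ ' ') :
    consume w cur = [cur.reverse ++ w] := by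
  induction w generalizing cur with
  | nil => simp [consume]
  | cons c rest ih =>
    have hc : c ≠ ' ' := hw c (by simp)
    simp only [consume, if_neg hc]
    rw [ih _ (fun x hx => hw x (by simp [hx]))]
    simp

theorem consume_append_space (a b : List Char) (cur : List Char) :
    consume (a ++ ' ' :: b) cur = consume a cur ++ consume b [] := by
  induction a generalizing cur with
  | nil => simp [consume]
  | cons c rest ih =>
    by_cases hc : c = ' '
    · subst hc; simp [consume, ih]
    · simp [consume, hc, ih]

-- A-side loop lemmas
theorem aLoop_hoist (l : List Char) (n : List Char) (ws : Bool) :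
    aLoop l n ws = n ++ aLoop l [] ws := by
  induction l generalizing n ws with
  | nil => simp [aLoop]
  | cons c rest ih =>
    by_cases hc : PySem.Chars.isspace c = true
    · cases ws
      · rw [show aLoop (c :: rest) n false = aLoop rest (n ++ [' ']) true from by
            simp [aLoop, hc],
          show aLoop (c :: rest) [] false = aLoop rest [' '] true from by simp [aLoop, hc],
          ih (n ++ [' ']) true, ih [' '] true]
        simp
      · rw [show aLoop (c :: rest) n true = aLoop rest n true from by simp [aLoop, hc],
          show aLoop (c :: rest) [] true = aLoop rest [] true from by simp [aLoop, hc]]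
        exact ih n true
    · rw [show aLoop (c :: rest) n ws = aLoop rest (n ++ [c]) false from by simp [aLoop, hc],
        show aLoop (c :: rest) [] ws = aLoop rest [c] false from by simp [aLoop, hc],
        ih (n ++ [c]) false, ih [c] false]
      simp

theorem aLoop_true_drop (l : List Char) :
    aLoop l [] true = aLoop (l.dropWhile PySem.Chars.isspace) [] false := by
  induction l with
  | nil => simp [aLoop]
  | cons c rest ih =>
    by_cases hc : PySem.Chars.isspace c = true
    · rw [List.dropWhile_cons_of_pos hc]
      simp only [aLoop, hc, if_true]
      exact ih
    · simp only [Bool.not_eq_true] at hc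
      rw [List.dropWhile_cons_of_neg (by simp [hc])]
      simp [aLoop, hc]

theorem aLoop_space_head (d : Char) (t : List Char) (hd : PySem.Chars.isspace d = true) :
    aLoop (d :: t) [] false = ' ' :: aLoop (t.dropWhile PySem.Chars.isspace) [] false := by
  simp only [aLoop, hd, if_true, Bool.false_eq_true, if_false, List.nil_append]
  rw [aLoop_hoist, aLoop_true_drop]
  simp

theorem aLoop_word (w t : List Char) (hw : ∀ c ∈ w, PySem.Chars.isspace c = false) :
    aLoop (w ++ t) [] false = w ++ aLoop t [] false := by
  induction w with
  | nil => simp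
  | cons c rest ih =>
    have hc := hw c (by simp)
    simp only [List.cons_append, aLoop, hc, Bool.false_eq_true, if_false, List.nil_append]
    rw [aLoop_hoist, ih (fun x hx => hw x (by simp [hx]))]
    simp

theorem noSpace_of_notSpace (w : List Char) (hw : ∀ c ∈ w, PySem.Chars.isspace c = false) :
    ∀ c ∈ w, c ≠ ' ' := by
  intro c hc hceq
  subst hceq
  have := hw ' ' hc
  simp [PySem.Chars.isspace] at this

theorem dropWhile_head_false {p : Char → Bool} {l : List Char} {d : Char} {t : List Char}
    (h : l.dropWhile p = d :: t) : p d = false := by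
  induction l with
  | nil => simp at h
  | cons c rest ih =>
    by_cases hc : p c = true
    · rw [List.dropWhile_cons_of_pos hc] at h; exact ih h
    · rw [List.dropWhile_cons_of_neg hc] at h
      cases h
      simpa using hc

-- B-side accumulator hoisting
theorem altLoop_hoist (l : List Char) (res : List String) (s : String) :
    altLoop l (res ++ [s]) = res ++ altLoop l [s] := by
  induction hn : l.length using Nat.strong_induction_on generalizing l res s with
  | _ n ih =>
    cases l with
    | nil => simp [altLoop]
    | cons c rest =>
      subst hn
      by_cases hc : PySem.Chars.isspace c = true
      · rw [altLoop, if_pos hc, altLoop, if_pos hc]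
        have hlt : (rest.dropWhile PySem.Chars.isspace).length < (c :: rest).length :=
          Nat.lt_succ_of_le (List.length_dropWhile_le _ _)
        rw [ih _ hlt _ (res ++ [s]) "" rfl, ih _ hlt _ [s] "" rfl]
        simp
      · rw [altLoop, if_neg hc, altLoop, if_neg hc]
        have hlt : (rest.dropWhile (fun x => !PySem.Chars.isspace x)).length < (c :: rest).length :=
          Nat.lt_succ_of_le (List.length_dropWhile_le _ _)
        rw [List.dropLast_concat, show ([s] : List String).dropLast = [] from rfl,
          List.nil_append, ih _ hlt _ res _ rfl]

theorem consume_space_cons (x : List Char) (cur : List Char) :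
    consume (' ' :: x) cur = cur.reverse :: consume x [] := by
  simp [consume]

theorem main_equiv (l : List Char) :
    (PySem.Chars.splitOn (aLoop l [] false) [' ']).map String.ofList = altLoop l [""] := by
  induction hn : l.length using Nat.strong_induction_on generalizing l with
  | _ n ih =>
    rw [splitOn_eq_consume]
    cases l with
    | nil => simp [aLoop, consume, altLoop]
    | cons c rest =>
      subst hn
      by_cases hc : PySem.Chars.isspace c = true
      · -- whitespace run at the head
        rw [aLoop_space_head c rest hc, consume_space_cons, List.reverse_nil, List.map_cons,
          ← splitOn_eq_consume,
          ih _ (Nat.lt_succ_of_le (List.length_dropWhile_le _ _)) _ rfl]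
        rw [altLoop, if_pos hc, altLoop_hoist]
        rfl
      · -- word run at the head
        have hw : ∀ x ∈ c :: rest.takeWhile (fun x => !PySem.Chars.isspace x),
            PySem.Chars.isspace x = false := by
          intro x hx
          rcases List.mem_cons.mp hx with h | h
          · subst h; simpa using hc
          · simpa using List.mem_takeWhile_imp h
        have hsplit : c :: rest =
            (c :: rest.takeWhile (fun x => !PySem.Chars.isspace x)) ++
              rest.dropWhile (fun x => !PySem.Chars.isspace x) := by
          simp [List.takeWhile_append_dropWhile]
        have hA : aLoop (c :: rest) [] false =
            (c :: rest.takeWhile (fun x => !PySem.Chars.isspace x)) ++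
              aLoop (rest.dropWhile (fun x => !PySem.Chars.isspace x)) [] false := by
          conv_lhs => rw [hsplit]
          exact aLoop_word _ _ hw
        rw [hA, altLoop, if_neg hc, show ([""] : List String).dropLast ++
            [String.ofList (c :: rest.takeWhile (fun x => !PySem.Chars.isspace x))] =
            [String.ofList (c :: rest.takeWhile (fun x => !PySem.Chars.isspace x))] from rfl]
        have hlt' : (rest.dropWhile (fun x => !PySem.Chars.isspace x)).length <
            (c :: rest).length := Nat.lt_succ_of_le (List.length_dropWhile_le _ _)
        cases hdw : rest.dropWhile (fun x => !PySem.Chars.isspace x) with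
        | nil =>
          rw [hdw] at *
          simp only [aLoop, List.append_nil]
          rw [consume_no_space _ _ (noSpace_of_notSpace _ hw)]
          simp [altLoop]
        | cons d t =>
          have hd : PySem.Chars.isspace d = true := by
            have := dropWhile_head_false hdw
            simpa using this
          rw [aLoop_space_head d t hd, consume_append_space,
            consume_no_space _ _ (noSpace_of_notSpace _ hw), ← splitOn_eq_consume]
          have hlt'' : (t.dropWhile PySem.Chars.isspace).length < (c :: rest).length := by
            have h1 : (t.dropWhile PySem.Chars.isspace).length ≤ t.length :=
              List.length_dropWhile_le _ _
            have h2 : (d :: t).length ≤ rest.length := hdw ▸ List.length_dropWhile_le _ _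
            simp only [List.length_cons] at h2 ⊢
            omega
          rw [List.map_append, ih _ hlt'' _ rfl]
          rw [altLoop, if_pos hd, altLoop_hoist]
          rfl

-- ===== VERDICT (by name: the statement is the Claim_ definition above) =====
theorem split_at_ws_spec : Claim_equal_split_at_ws := by
  intro line _
  unfold Spec_split_at_ws split_at_ws split_at_ws_alt
  exact main_equiv line.toList
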